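-- pv_equiv track=rewrite | github.com/HarisRasul12/ESC499-Thesis-SAT-Trees | pySAT Implementation/fixed_height_tree_module.py | create_literals_fixed_tree
-- ===== SOURCE A (Python) =====
-- def create_literals_fixed_tree(TB, TL, F, C, dataset_size):
--     """
--     Create the literals for the SAT solver based on the tree structure and dataset size.
--
--     This function creates four types of literals:
--     - 'a' literals for feature splits at branching nodes,
--     - 's' literals for data points directed to left or right,
--     - 'z' literals for data points that end up at a leaf node,
--     - 'g' literals for assigning class labels to leaf nodes.
--     - 'p' literals for checking of data point was assigned correct label or not
--
--     Parameters:
--     - TB (list): Indices of branching nodes in the tree.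
--     - TL (list): Indices of leaf nodes in the tree.
--     - num_features (int): The number of features in the dataset.
--     - labels (list): The list of class labels for the dataset.
--     - dataset_size (int): The number of data points in the dataset.
--
--     Returns:
--     - literals (dict): A dictionary where keys are literal names and values are their corresponding indices for the SAT solver.
--     """
--
--     literals = {}
--     current_index = 1
--
--     # Create 'a' literals for feature splits at branching nodes
--     for t in TB:
--         for j in F:
--             literals[f'a_{t}_{j}'] = current_index
--             current_index += 1
--
--     # Create 's' literals for data points directed left or right at branching nodes
--     for i in range(dataset_size):
--         for t in TB:
--             literals[f's_{i}_{t}'] = current_index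
--             current_index += 1
--
--     # Create 'z' literals for data points ending up at leaf nodes
--     for i in range(dataset_size):
--         for t in TL:
--             literals[f'z_{i}_{t}'] = current_index
--             current_index += 1
--
--     # Create 'g' literals for labels at leaf nodes
--     for t in TL:
--         for c in C:
--             literals[f'g_{t}_{c}'] = current_index
--             current_index += 1
--
--     # Create 'p' literals for checking correct label association given to training data point
--     for i in range(dataset_size):
--         literals[f'p_{i}'] = current_index
--         current_index += 1
--
--     return literals
-- ===== SOURCE B (Python) =====
-- def create_literals_fixed_tree(TB, TL, F, C, dataset_size):
--     # Index-first construction: instead of threading one counter through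
--     # nested loops over the tree structures, iterate over each block's flat
--     # index range and decode the flat index k into its coordinates by divmod;
--     # each literal's number is the block base plus k plus 1.
--     literals = {}
--     nb, nl, nf, nc = len(TB), len(TL), len(F), len(C)
--     base = 0
--     for k in range(nb * nf):
--         t, j = divmod(k, nf)
--         literals[f'a_{TB[t]}_{F[j]}'] = base + k + 1
--     base += nb * nf
--     n = max(dataset_size, 0)
--     for k in range(n * nb):
--         i, t = divmod(k, nb)
--         literals[f's_{i}_{TB[t]}'] = base + k + 1
--     base += n * nb
--     for k in range(n * nl):
--         i, t = divmod(k, nl)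
--         literals[f'z_{i}_{TL[t]}'] = base + k + 1
--     base += n * nl
--     for k in range(nl * nc):
--         t, c = divmod(k, nc)
--         literals[f'g_{TL[t]}_{C[c]}'] = base + k + 1
--     base += nl * nc
--     for i in range(dataset_size):
--         literals[f'p_{i}'] = base + i + 1
--     return literals
-- ===== Notes on version B (the rewrite author's own statement) =====
-- stated objective: alternative
-- what changed: B is index-first: instead of A's nested loops over the tree structures threading one mutable counter, B loops over each block's flat index range and decodes each index k by divmod into its coordinates (looking the node/feature/class up by position), assigning base+k+1.
import Mathlib
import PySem

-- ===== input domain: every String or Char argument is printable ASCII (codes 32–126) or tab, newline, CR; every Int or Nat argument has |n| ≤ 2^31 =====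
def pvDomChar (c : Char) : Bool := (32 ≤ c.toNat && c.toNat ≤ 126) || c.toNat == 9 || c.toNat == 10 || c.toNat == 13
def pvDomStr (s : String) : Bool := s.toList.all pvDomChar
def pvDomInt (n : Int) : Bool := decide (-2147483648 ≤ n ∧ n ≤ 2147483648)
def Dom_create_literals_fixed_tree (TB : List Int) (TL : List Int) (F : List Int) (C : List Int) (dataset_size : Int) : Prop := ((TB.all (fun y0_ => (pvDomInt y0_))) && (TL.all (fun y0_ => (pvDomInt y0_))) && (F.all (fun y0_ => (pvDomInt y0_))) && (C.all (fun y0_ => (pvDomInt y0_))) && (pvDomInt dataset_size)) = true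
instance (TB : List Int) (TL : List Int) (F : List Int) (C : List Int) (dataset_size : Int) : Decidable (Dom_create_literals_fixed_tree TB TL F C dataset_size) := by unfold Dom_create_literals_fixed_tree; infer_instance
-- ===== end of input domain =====

-- B is index-first: it loops over each block's flat index range, decoding each
-- flat index into coordinates by divmod, instead of A's nested loops threading
-- one counter (alternative decomposition, same cost; return value proved equal).

-- ===== PORT A =====
-- literal transliteration of A: a dict and a counter threaded through five
-- nested loop blocks (state = (literals, current_index)).
def create_literals_fixed_tree (TB : List Int) (TL : List Int) (F : List Int) (C : List Int) (dataset_size : Int) : List (String × Int) :=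
  let s0 : PySem.Dict String Int × Int := (PySem.Dict.empty, 1)
  let s1 := TB.foldl (fun s t => F.foldl
      (fun s j => (s.1.insert ("a_" ++ PySem.Int.toStr t ++ "_" ++ PySem.Int.toStr j) s.2, s.2 + 1)) s) s0
  let s2 := (PySem.List.pyRange 0 dataset_size 1).foldl (fun s i => TB.foldl
      (fun s t => (s.1.insert ("s_" ++ PySem.Int.toStr i ++ "_" ++ PySem.Int.toStr t) s.2, s.2 + 1)) s) s1
  let s3 := (PySem.List.pyRange 0 dataset_size 1).foldl (fun s i => TL.foldl
      (fun s t => (s.1.insert ("z_" ++ PySem.Int.toStr i ++ "_" ++ PySem.Int.toStr t) s.2, s.2 + 1)) s) s2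
  let s4 := TL.foldl (fun s t => C.foldl
      (fun s c => (s.1.insert ("g_" ++ PySem.Int.toStr t ++ "_" ++ PySem.Int.toStr c) s.2, s.2 + 1)) s) s3
  let s5 := (PySem.List.pyRange 0 dataset_size 1).foldl
      (fun s i => (s.1.insert ("p_" ++ PySem.Int.toStr i) s.2, s.2 + 1)) s4
  s5.1.items

-- ===== PORT B =====
-- literal transliteration of B: five independent loops over each block's flat
-- index range; the flat index k is decoded by divmod (floordiv/mod) and the
-- decoded list positions are always in range, so pyGetD's default is never read.
def create_literals_fixed_tree_alt (TB : List Int) (TL : List Int) (F : List Int) (C : List Int) (dataset_size : Int) : List (String × Int) :=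
  let d0 : PySem.Dict String Int := PySem.Dict.empty
  let b0 : Int := 0
  let d1 := (PySem.List.pyRange 0 (PySem.List.len TB * PySem.List.len F) 1).foldl (fun d k =>
      d.insert ("a_" ++ PySem.Int.toStr (PySem.List.pyGetD TB (PySem.Int.floordiv k (PySem.List.len F)) 0)
        ++ "_" ++ PySem.Int.toStr (PySem.List.pyGetD F (PySem.Int.mod k (PySem.List.len F)) 0)) (b0 + k + 1)) d0
  let b1 := b0 + PySem.List.len TB * PySem.List.len F
  let n : Int := max dataset_size 0
  let d2 := (PySem.List.pyRange 0 (n * PySem.List.len TB) 1).foldl (fun d k =>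
      d.insert ("s_" ++ PySem.Int.toStr (PySem.Int.floordiv k (PySem.List.len TB))
        ++ "_" ++ PySem.Int.toStr (PySem.List.pyGetD TB (PySem.Int.mod k (PySem.List.len TB)) 0)) (b1 + k + 1)) d1
  let b2 := b1 + n * PySem.List.len TB
  let d3 := (PySem.List.pyRange 0 (n * PySem.List.len TL) 1).foldl (fun d k =>
      d.insert ("z_" ++ PySem.Int.toStr (PySem.Int.floordiv k (PySem.List.len TL))
        ++ "_" ++ PySem.Int.toStr (PySem.List.pyGetD TL (PySem.Int.mod k (PySem.List.len TL)) 0)) (b2 + k + 1)) d2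
  let b3 := b2 + n * PySem.List.len TL
  let d4 := (PySem.List.pyRange 0 (PySem.List.len TL * PySem.List.len C) 1).foldl (fun d k =>
      d.insert ("g_" ++ PySem.Int.toStr (PySem.List.pyGetD TL (PySem.Int.floordiv k (PySem.List.len C)) 0)
        ++ "_" ++ PySem.Int.toStr (PySem.List.pyGetD C (PySem.Int.mod k (PySem.List.len C)) 0)) (b3 + k + 1)) d3
  let b4 := b3 + PySem.List.len TL * PySem.List.len C
  let d5 := (PySem.List.pyRange 0 dataset_size 1).foldl (fun d i =>
      d.insert ("p_" ++ PySem.Int.toStr i) (b4 + i + 1)) d4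
  d5.items

-- ===== PRECONDITION & SPEC =====
def Spec_create_literals_fixed_tree (TB : List Int) (TL : List Int) (F : List Int) (C : List Int) (dataset_size : Int) (out : List (String × Int)) : Prop := out = create_literals_fixed_tree_alt TB TL F C dataset_size
instance (TB : List Int) (TL : List Int) (F : List Int) (C : List Int) (dataset_size : Int) (out : List (String × Int)) : Decidable (Spec_create_literals_fixed_tree TB TL F C dataset_size out) := by unfold Spec_create_literals_fixed_tree; infer_instance

-- ===== CLAIM (what is proved, stated in full; the proofs are below) =====
def Claim_equal_create_literals_fixed_tree : Prop := ∀ (TB : List Int) (TL : List Int) (F : List Int) (C : List Int) (dataset_size : Int), Dom_create_literals_fixed_tree TB TL F C dataset_size → Spec_create_literals_fixed_tree TB TL F C dataset_size (create_literals_fixed_tree TB TL F C dataset_size)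

-- ===== LEMMAS AND PROOFS =====

-- A's counter-threaded fold over a flat list of keys = an enumerate-then-insert
-- fold, and the counter ends at start + length.
theorem pv_thread_eq_enumerate (ks : List String) (d : PySem.Dict String Int) (n : Int) :
    ks.foldl (fun s k => (s.1.insert k s.2, s.2 + 1)) (d, n)
      = ((PySem.List.enumerate ks n).foldl (fun d (p : Int × String) => d.insert p.2 p.1) d,
         n + ks.length) := by
  induction ks generalizing d n with
  | nil => simp [PySem.List.enumerate_nil]
  | cons k ks ih =>
      simp only [List.foldl_cons, PySem.List.enumerate_cons, ih, List.length_cons]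
      refine Prod.ext rfl ?_
      push_cast; ring

-- one doubly-nested counter-threaded block of A = the flat threaded fold over
-- the corresponding flatMap/map name list
theorem pv_block {α β : Type} (xs : List α) (ys : List β) (nm : α → β → String)
    (s : PySem.Dict String Int × Int) :
    xs.foldl (fun s x => ys.foldl (fun s y => (s.1.insert (nm x y) s.2, s.2 + 1)) s) s
      = (xs.flatMap (fun x => ys.map (nm x))).foldl (fun s k => (s.1.insert k s.2, s.2 + 1)) s := by
  induction xs generalizing s with
  | nil => simp
  | cons x xs ih =>
      simp only [List.foldl_cons, List.flatMap_cons, List.foldl_append, ih, List.foldl_map]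

-- A's final 'p' loop = the flat threaded fold over its mapped names
theorem pv_blockp (xs : List Int) (s : PySem.Dict String Int × Int) :
    xs.foldl (fun s i => (s.1.insert ("p_" ++ PySem.Int.toStr i) s.2, s.2 + 1)) s
      = (xs.map (fun i => "p_" ++ PySem.Int.toStr i)).foldl
          (fun s k => (s.1.insert k s.2, s.2 + 1)) s := by
  rw [List.foldl_map]

-- B's indexed insert loop over pyRange s (s+n) = an enumerate-then-insert fold
-- over the mapped names
theorem pv_idx (f : Int → String) (base : Int) :
    ∀ (n : Nat) (s : Int) (d : PySem.Dict String Int),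
    (PySem.List.pyRange s (s + n) 1).foldl (fun d k => d.insert (f k) (base + k + 1)) d
      = (PySem.List.enumerate ((PySem.List.pyRange s (s + n) 1).map f) (base + s + 1)).foldl
          (fun d (p : Int × String) => d.insert p.2 p.1) d := by
  intro n
  induction n with
  | zero =>
      intro s d
      simp [PySem.List.pyRange_one_eq_nil (le_refl s), PySem.List.enumerate_nil]
  | succ n ih =>
      intro s d
      have hc : PySem.List.pyRange s (s + (n + 1 : Nat)) 1
          = s :: PySem.List.pyRange (s + 1) (s + (n + 1 : Nat)) 1 :=
        PySem.List.pyRange_one_cons (by push_cast; omega)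
      have he : s + ((n : Int) + 1) = (s + 1) + n := by ring
      rw [hc]
      simp only [List.foldl_cons, List.map_cons, PySem.List.enumerate_cons]
      push_cast
      rw [he, ih (s + 1) (d.insert (f s) (base + s + 1))]
      ring_nf

-- wrapper for ranges starting at 0 with an arbitrary Int bound
theorem pv_idx0 (f : Int → String) (base : Int) (N : Int) (d : PySem.Dict String Int) :
    (PySem.List.pyRange 0 N 1).foldl (fun d k => d.insert (f k) (base + k + 1)) d
      = (PySem.List.enumerate ((PySem.List.pyRange 0 N 1).map f) (base + 1)).foldl
          (fun d (p : Int × String) => d.insert p.2 p.1) d := by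
  rcases le_or_gt N 0 with h | h
  · simp [PySem.List.pyRange_one_eq_nil h, PySem.List.enumerate_nil]
  · have hN : N = (0 : Int) + (N.toNat : Int) := by omega
    have := pv_idx f base N.toNat 0 d
    rw [← hN] at this
    simpa using this

-- Nat grid decode: mapping divmod decode over a flat range = the nested grid
theorem pv_gridN (m w : Nat) (h : Nat → Nat → String) :
    (List.range (m * w)).map (fun k => h (k / w) (k % w))
      = (List.range m).flatMap (fun t => (List.range w).map (h t)) := by
  rcases Nat.eq_zero_or_pos w with hw | hw
  · subst hw; simp
  · induction m with
    | zero => simp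
    | succ m ih =>
        have hmw : (m + 1) * w = m * w + w := by ring
        rw [hmw, List.range_add, List.map_append, List.range_succ, List.flatMap_append, ih]
        simp only [List.map_map, List.flatMap_cons, List.flatMap_nil, List.append_nil]
        congr 1
        apply List.map_congr_left
        intro j hj
        have hj' : j < w := List.mem_range.mp hj
        have h1 : (m * w + j) / w = m := by
          rw [Nat.mul_comm m w, Nat.mul_add_div hw]
          simp [Nat.div_eq_of_lt hj']
        have h2 : (m * w + j) % w = j := by
          rw [Nat.mul_comm m w, Nat.mul_add_mod]
          exact Nat.mod_eq_of_lt hj'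
        simp [Function.comp, h1, h2]

-- indexing a list by every position in order reproduces the list
theorem pv_map_getD (xs : List Int) : (List.range xs.length).map (fun i => xs.getD i 0) = xs := by
  apply List.ext_getElem
  · simp
  · intro i h1 h2
    simp [List.getD_eq_getElem?_getD, List.getElem?_eq_getElem h2]

-- both coordinates looked up by position: block name list = the nested flatMap list
theorem pv_ablock (xs ys : List Int) (nm : Int → Int → String) :
    (PySem.List.pyRange 0 (PySem.List.len xs * PySem.List.len ys) 1).map (fun k =>
        nm (PySem.List.pyGetD xs (PySem.Int.floordiv k (PySem.List.len ys)) 0)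
           (PySem.List.pyGetD ys (PySem.Int.mod k (PySem.List.len ys)) 0))
      = xs.flatMap (fun x => ys.map (nm x)) := by
  rw [PySem.List.pyRange_one]
  have hlen : ((PySem.List.len xs * PySem.List.len ys - 0).toNat) = xs.length * ys.length := by
    simp only [PySem.List.len_eq, sub_zero]
    omega
  rw [hlen, List.map_map]
  have hfun : ((fun k => nm (PySem.List.pyGetD xs (PySem.Int.floordiv k (PySem.List.len ys)) 0)
           (PySem.List.pyGetD ys (PySem.Int.mod k (PySem.List.len ys)) 0)) ∘ (fun k : Nat => (0 : Int) + k))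
      = fun k : Nat => nm (xs.getD (k / ys.length) 0) (ys.getD (k % ys.length) 0) := by
    funext k
    simp only [Function.comp_apply, zero_add, PySem.List.len_eq,
      PySem.Int.floordiv_natCast, PySem.Int.mod_natCast, PySem.List.pyGetD_natCast,
      List.getD_eq_getElem?_getD]
  rw [hfun, pv_gridN xs.length ys.length (fun t j => nm (xs.getD t 0) (ys.getD j 0))]
  calc (List.range xs.length).flatMap (fun t => (List.range ys.length).map (fun j => nm (xs.getD t 0) (ys.getD j 0)))
      = (List.range xs.length).flatMap (fun t => ys.map (nm (xs.getD t 0))) := by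
        apply List.flatMap_congr; intro t _
        conv_rhs => rw [← pv_map_getD ys]
        rw [List.map_map]
        rfl
    _ = ((List.range xs.length).map (fun t => xs.getD t 0)).flatMap (fun x => ys.map (nm x)) := by
        rw [List.flatMap_map]
    _ = xs.flatMap (fun x => ys.map (nm x)) := by rw [pv_map_getD]

-- first coordinate is the raw quotient (a data-point index), second looked up
theorem pv_sblock (n : Int) (ys : List Int) (nm : Int → Int → String) :
    (PySem.List.pyRange 0 (max n 0 * PySem.List.len ys) 1).map (fun k =>
        nm (PySem.Int.floordiv k (PySem.List.len ys))
           (PySem.List.pyGetD ys (PySem.Int.mod k (PySem.List.len ys)) 0))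
      = (PySem.List.pyRange 0 n 1).flatMap (fun i => ys.map (nm i)) := by
  rw [PySem.List.pyRange_one, PySem.List.pyRange_one]
  have hlen : ((max n 0 * PySem.List.len ys - 0).toNat) = n.toNat * ys.length := by
    simp only [PySem.List.len_eq, sub_zero]
    rcases le_or_gt n 0 with h | h
    · rw [max_eq_right h]
      have hn0 : n.toNat = 0 := by omega
      simp [hn0]
    · obtain ⟨m, rfl⟩ : ∃ m : Nat, n = ↑m := ⟨n.toNat, by omega⟩
      rw [max_eq_left (le_of_lt h),
        show ((m : Int) * (ys.length : Int)) = ((m * ys.length : Nat) : Int) by push_cast; ring, Int.toNat_natCast, Int.toNat_natCast]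
  have hlen2 : ((n - 0 : Int).toNat) = n.toNat := by omega
  rw [hlen, hlen2, List.map_map, List.flatMap_map]
  have hfun : ((fun k => nm (PySem.Int.floordiv k (PySem.List.len ys))
           (PySem.List.pyGetD ys (PySem.Int.mod k (PySem.List.len ys)) 0)) ∘ (fun k : Nat => (0 : Int) + k))
      = fun k : Nat => nm ((k / ys.length : Nat) : Int) (ys.getD (k % ys.length) 0) := by
    funext k
    simp only [Function.comp_apply, zero_add, PySem.List.len_eq,
      PySem.Int.floordiv_natCast, PySem.Int.mod_natCast, PySem.List.pyGetD_natCast,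
      List.getD_eq_getElem?_getD]
  rw [hfun, pv_gridN n.toNat ys.length (fun t j => nm ((t : Nat) : Int) (ys.getD j 0))]
  apply List.flatMap_congr
  intro t _
  simp only [zero_add]
  conv_rhs => rw [← pv_map_getD ys]
  rw [List.map_map]
  rfl

-- length of a nested block name list
theorem pv_len {α β : Type} (xs : List α) (ys : List β) (nm : α → β → String) :
    (xs.flatMap (fun x => ys.map (nm x))).length = xs.length * ys.length := by
  simp only [List.length_flatMap, List.length_map]
  induction xs with
  | nil => simp
  | cons x xs ih => simp; ring

-- ===== VERDICT (by name: the statement is the Claim_ definition above) =====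
theorem create_literals_fixed_tree_spec : Claim_equal_create_literals_fixed_tree := by
  intro TB TL F C dataset_size _
  show _ = _
  unfold create_literals_fixed_tree create_literals_fixed_tree_alt
  simp only [pv_block, pv_blockp, ← List.foldl_append, List.append_assoc,
    pv_thread_eq_enumerate]
  rw [pv_idx0, pv_idx0, pv_idx0, pv_idx0, pv_idx0]
  rw [pv_ablock TB F (fun x y => "a_" ++ PySem.Int.toStr x ++ "_" ++ PySem.Int.toStr y),
    pv_sblock dataset_size TB (fun x y => "s_" ++ PySem.Int.toStr x ++ "_" ++ PySem.Int.toStr y),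
    pv_sblock dataset_size TL (fun x y => "z_" ++ PySem.Int.toStr x ++ "_" ++ PySem.Int.toStr y),
    pv_ablock TL C (fun x y => "g_" ++ PySem.Int.toStr x ++ "_" ++ PySem.Int.toStr y)]
  simp only [List.foldl_append, pv_len, PySem.List.length_pyRange_one, PySem.List.len_eq, sub_zero]
  push_cast
  simp only [Int.ofNat_toNat]
  ring_nf
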